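-- pv_equiv track=rewrite | github.com/AmitShanbhoug/ITI-1120 | Assignments/Assignment 3/a3_part1_8677407.py | coprime
-- ===== SOURCE A (Python) =====
-- def coprime(x,y):
--     '''
--     (int,int) -> Boolean
--
--     Returns True if two input integers are coprimes and false otherwise.
--     '''
--
--     a = []
--     b = []
--
--     samefactor = 0
--
--     for i in range(1,x+1):
--
--         if x%i == 0:
--             a.append(i)
--
--     for j in range(1,y+1):
--
--         if y%j == 0:
--             b.append(j)
--
--
--     for c in range(len(a)):
--         for d in range(len(b)):
--
--             if a[c] == b[d]:
--                 samefactor += 1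
--
--     return (samefactor == 1)
-- ===== SOURCE B (Python) =====
-- def coprime(x, y):
--     '''
--     (int,int) -> Boolean
--
--     Returns True if two input integers are coprimes and false otherwise.
--     '''
--     if x <= 0 or y <= 0:
--         return False
--     while y:
--         x, y = y, x % y
--     return x == 1
-- ===== Notes on version B (the rewrite author's own statement) =====
-- stated objective: faster
-- what changed: Replaces the divisor-list enumeration of both numbers plus a quadratic common-divisor count with an Euclidean-gcd loop (guarded by x>0 and y>0, where A always returns False).
import Mathlib
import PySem

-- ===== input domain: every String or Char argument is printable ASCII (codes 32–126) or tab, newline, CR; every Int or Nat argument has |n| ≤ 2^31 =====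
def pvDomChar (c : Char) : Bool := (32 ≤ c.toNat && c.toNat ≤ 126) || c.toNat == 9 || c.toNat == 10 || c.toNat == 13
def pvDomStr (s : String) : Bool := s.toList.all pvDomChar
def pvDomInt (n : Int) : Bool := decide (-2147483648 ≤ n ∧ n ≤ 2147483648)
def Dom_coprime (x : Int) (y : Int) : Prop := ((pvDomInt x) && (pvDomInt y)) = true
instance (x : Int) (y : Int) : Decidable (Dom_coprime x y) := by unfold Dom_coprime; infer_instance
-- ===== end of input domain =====

-- B replaces A's divisor enumeration + quadratic common-divisor count by a Euclidean gcd loop (faster, asymptotic).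

-- ===== PORT A =====
def coprime (x : Int) (y : Int) : Bool :=
  let a := (PySem.List.pyRange 1 (x+1) 1).foldl
    (fun acc i => if PySem.Int.mod x i == 0 then acc ++ [i] else acc) ([] : List Int)
  let b := (PySem.List.pyRange 1 (y+1) 1).foldl
    (fun acc j => if PySem.Int.mod y j == 0 then acc ++ [j] else acc) ([] : List Int)
  let samefactor := (PySem.List.pyRange 0 (a.length) 1).foldl
    (fun s c => (PySem.List.pyRange 0 (b.length) 1).foldl
      (fun s d => if PySem.List.pyGetD a c 0 == PySem.List.pyGetD b d 0 then s + 1 else s) s)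
    (0 : Int)
  samefactor == 1

-- ===== PORT B =====
-- the 'while y: x, y = y, x % y' loop of Source B
def gcdLoop (x : Int) (y : Int) : Int :=
  if y = 0 then x else gcdLoop y (PySem.Int.mod x y)
termination_by y.natAbs
decreasing_by
  rename_i hy
  rcases lt_or_gt_of_ne hy with h | h
  · have h1 := PySem.Int.mod_neg_bounds x h
    omega
  · have h1 := PySem.Int.mod_nonneg x h
    have h2 := PySem.Int.mod_lt x h
    omega

def coprime_alt (x : Int) (y : Int) : Bool :=
  if x ≤ 0 || y ≤ 0 then false
  else gcdLoop x y == 1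

-- ===== PRECONDITION & SPEC =====
def Spec_coprime (x : Int) (y : Int) (out : Bool) : Prop := out = coprime_alt x y
instance (x : Int) (y : Int) (out : Bool) : Decidable (Spec_coprime x y out) := by unfold Spec_coprime; infer_instance

-- ===== CLAIM (what is proved, stated in full; the proofs are below) =====
def Claim_equal_coprime : Prop := ∀ (x : Int) (y : Int), Dom_coprime x y → Spec_coprime x y (coprime x y)

-- ===== LEMMAS AND PROOFS =====

-- helper: the common-divisor lists
def divs (x : Int) : List Int :=
  (PySem.List.pyRange 1 (x+1) 1).filter (fun i => PySem.Int.mod x i == 0)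

theorem foldl_skip (l : List Int) (s : Int) : l.foldl (fun s _ => s) s = s := by
  induction l <;> simp_all [List.foldl]

theorem foldl_range'_getD (g : Int → Int → Int) (l pre : List Int) (s : Int) :
    (List.range' pre.length l.length).foldl (fun s k => g s ((pre ++ l).getD k 0)) s
      = l.foldl g s := by
  induction l generalizing pre s with
  | nil => simp
  | cons w l' ih =>
    rw [List.length_cons, List.range'_succ]
    simp only [List.foldl_cons]
    have hget : (pre ++ w :: l').getD pre.length 0 = w := by
      simp [List.getD]
    rw [hget]
    have := ih (pre ++ [w]) (g s w)
    simpa using this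

theorem foldl_index (l : List Int) (g : Int → Int → Int) (s : Int) :
    (PySem.List.pyRange 0 (l.length : Int) 1).foldl
      (fun s d => g s (PySem.List.pyGetD l d 0)) s = l.foldl g s := by
  rw [PySem.List.pyRange_zero_natCast l.length, List.foldl_map]
  simp only [PySem.List.pyGetD_natCast]
  have := foldl_range'_getD g l [] s
  simpa [List.range_eq_range'] using this

theorem foldl_ite_count (b : List Int) (v s : Int) :
    b.foldl (fun s w => if v == w then s + 1 else s) s = s + (b.count v : Int) := by
  induction b generalizing s with
  | nil => simp
  | cons w bs ih =>
    rw [List.foldl_cons, List.count_cons]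
    by_cases h : (v == w) = true
    · rw [if_pos h, ih]
      rw [if_pos (by rw [beq_iff_eq] at h ⊢; omega)]
      push_cast
      ring
    · rw [if_neg h, ih]
      rw [if_neg (by rw [beq_iff_eq] at h ⊢; omega)]
      push_cast
      ring

theorem foldl_count_sum (a b : List Int) (hb : b.Nodup) :
    a.foldl (fun s v => s + (b.count v : Int)) 0
      = ((a.filter (fun v => decide (v ∈ b))).length : Int) := by
  induction a with
  | nil => simp
  | cons v a' ih =>
    rw [List.foldl_cons]
    have shift : ∀ (l : List Int) (t : Int),
        l.foldl (fun s v => s + (b.count v : Int)) t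
          = t + l.foldl (fun s v => s + (b.count v : Int)) 0 := by
      intro l
      induction l with
      | nil => simp
      | cons w l' ihl => intro t; simp only [List.foldl_cons]; rw [ihl, ihl (0 + _)]; ring
    rw [shift, ih]
    by_cases h : v ∈ b
    · rw [List.count_eq_one_of_mem hb h]
      simp [h]
      ring
    · rw [List.count_eq_zero_of_not_mem h]
      simp [h]

theorem mem_divs {x v : Int} (hx : 0 < x) : v ∈ divs x ↔ 1 ≤ v ∧ v ∣ x := by
  simp only [divs, List.mem_filter, PySem.List.mem_pyRange_one, beq_iff_eq,
    PySem.Int.mod_eq_zero_iff_dvd]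
  constructor
  · rintro ⟨⟨h1, _⟩, h3⟩; exact ⟨h1, h3⟩
  · rintro ⟨h1, h3⟩
    exact ⟨⟨h1, by have := Int.le_of_dvd hx h3; omega⟩, h3⟩

theorem nodup_divs (x : Int) : (divs x).Nodup :=
  (PySem.List.nodup_pyRange_one _ _).filter _

theorem count_common {x y : Int} (hx : 0 < x) (hy : 0 < y) :
    (((divs x).filter (fun v => decide (v ∈ divs y))).length = 1) ↔ Int.gcd x y = 1 := by
  set common := (divs x).filter (fun v => decide (v ∈ divs y)) with hc
  have hmem : ∀ v, v ∈ common ↔ 1 ≤ v ∧ v ∣ x ∧ v ∣ y := by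
    intro v
    simp [hc, List.mem_filter, mem_divs hx, mem_divs hy]
    tauto
  have h1 : (1 : Int) ∈ common := (hmem 1).mpr ⟨le_refl 1, one_dvd x, one_dvd y⟩
  have hgpos : 0 < Int.gcd x y := Int.gcd_pos_of_ne_zero_left y (by omega)
  have hg : ((Int.gcd x y : Int)) ∈ common := by
    refine (hmem _).mpr ⟨by exact_mod_cast hgpos, Int.gcd_dvd_left x y, Int.gcd_dvd_right x y⟩
  constructor
  · intro hlen
    obtain ⟨c, hc1⟩ := List.length_eq_one_iff.mp hlen
    rw [hc1] at h1 hg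
    simp at h1 hg
    have : ((Int.gcd x y : Int)) = 1 := by rw [hg, ← h1]
    exact_mod_cast this
  · intro hgcd
    have hall : ∀ v ∈ common, v = 1 := by
      intro v hv
      obtain ⟨hv1, hvx, hvy⟩ := (hmem v).mp hv
      have hnat : v.natAbs ∣ Int.gcd x y :=
        Nat.dvd_gcd (Int.natAbs_dvd_natAbs.mpr hvx) (Int.natAbs_dvd_natAbs.mpr hvy)
      rw [hgcd] at hnat
      have := Nat.eq_one_of_dvd_one hnat
      omega
    have hnd : common.Nodup := (nodup_divs x).filter _
    cases hcom : common with
    | nil => rw [hcom] at h1; simp at h1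
    | cons c cs =>
      rw [hcom] at hall hnd
      have hc1 : c = 1 := hall c (by simp)
      have : cs = [] := by
        cases hcs : cs with
        | nil => rfl
        | cons d ds =>
          have hd : d = 1 := hall d (by simp [hcs])
          rw [hcs] at hnd
          simp [hc1, hd] at hnd
      simp [this]

theorem gcdLoop_eq (x y : Int) (hx : 0 ≤ x) (hy : 0 ≤ y) :
    gcdLoop x y = (Int.gcd x y : Int) := by
  generalize h : y.natAbs = n
  induction n using Nat.strong_induction_on generalizing x y with
  | _ n ih =>
    rw [gcdLoop]
    split
    · rename_i h0
      subst h0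
      rw [Int.gcd_zero_right]
      exact (Int.natAbs_of_nonneg hx).symm
    · rename_i h0
      have hy' : 0 < y := lt_of_le_of_ne hy (Ne.symm h0)
      rw [PySem.Int.mod_eq_emod_of_pos hy']
      have hm0 : 0 ≤ x % y := Int.emod_nonneg x (ne_of_gt hy')
      have hml : x % y < y := Int.emod_lt_of_pos x hy'
      rw [ih (x % y).natAbs (by omega) y (x % y) hy hm0 rfl]
      rw [Int.gcd_comm, Int.gcd_emod]

theorem coprime_main (x y : Int) : coprime x y = coprime_alt x y := by
  by_cases hx : x ≤ 0
  · simp only [coprime, coprime_alt]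
    rw [show PySem.List.pyRange 1 (x+1) 1 = [] from PySem.List.pyRange_one_eq_nil (by omega)]
    simp only [List.foldl_nil, List.length_nil, Int.natCast_zero]
    rw [show PySem.List.pyRange 0 0 1 = [] from PySem.List.pyRange_one_eq_nil (le_refl 0)]
    simp [hx]
  · by_cases hy : y ≤ 0
    · simp only [coprime, coprime_alt]
      rw [show PySem.List.pyRange 1 (y+1) 1 = [] from PySem.List.pyRange_one_eq_nil (by omega)]
      simp only [List.foldl_nil, List.length_nil, Int.natCast_zero]
      rw [show PySem.List.pyRange 0 0 1 = [] from PySem.List.pyRange_one_eq_nil (le_refl 0)]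
      simp only [List.foldl_nil, foldl_skip]
      simp [hy]
    · have hx' : 0 < x := by omega
      have hy' : 0 < y := by omega
      simp only [coprime, coprime_alt, PySem.List.foldl_append_if, List.nil_append]
      have ha : List.map (fun v : Int => v) ((PySem.List.pyRange 1 (x+1) 1).filter (fun i => PySem.Int.mod x i == 0)) = divs x := by simp [divs]
      have hb : List.map (fun v : Int => v) ((PySem.List.pyRange 1 (y+1) 1).filter (fun j => PySem.Int.mod y j == 0)) = divs y := by simp [divs]
      rw [ha, hb]
      rw [foldl_index (divs x)
        (fun s v => (PySem.List.pyRange 0 ((divs y).length : Int) 1).foldl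
          (fun s d => if v == PySem.List.pyGetD (divs y) d 0 then s + 1 else s) s) 0]
      have hinner : ∀ (s v : Int),
          (PySem.List.pyRange 0 ((divs y).length : Int) 1).foldl
            (fun s d => if v == PySem.List.pyGetD (divs y) d 0 then s + 1 else s) s
            = s + ((divs y).count v : Int) := by
        intro s v
        rw [foldl_index (divs y) (fun s w => if v == w then s + 1 else s) s]
        exact foldl_ite_count _ v s
      simp only [hinner]
      rw [foldl_count_sum _ _ (nodup_divs y)]
      rw [Bool.eq_iff_iff]
      simp only [beq_iff_eq]
      rw [if_neg (by simp; omega : ¬ (decide (x ≤ 0) || decide (y ≤ 0)) = true)]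
      rw [gcdLoop_eq x y hx'.le hy'.le]
      have hcc := count_common hx' hy'
      constructor
      · intro h
        have hg : x.gcd y = 1 := hcc.mp (by exact_mod_cast h)
        simp [hg]
      · intro h
        have hg : x.gcd y = 1 := by
          have : ((x.gcd y : Int)) = 1 := by simpa using h
          exact_mod_cast this
        exact_mod_cast hcc.mpr hg

-- ===== VERDICT (by name: the statement is the Claim_ definition above) =====
theorem coprime_spec : Claim_equal_coprime := by
  intro x y _
  exact coprime_main x y
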